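-- pv_equiv track=rewrite | github.com/chuckrak/StochasticBaseball | x.py | solution
-- ===== SOURCE A (Python) =====
-- def merge_elements(a, b):
--     return int(str(a) + str(b))
--
-- def solution(A):
--     n = len(A)
--
--     # Initialize the dynamic programming table
--     dp = [0] * (n + 1)
--
--     # Fill in the dynamic programming table from right to left
--     for i in range(n - 1, -1, -1):
--         # Option 1: Merge with the next element (if possible)
--         merged_sum = 0
--         if i + 1 < n:
--             merged_sum = merge_elements(A[i], A[i + 1]) + dp[i + 2]
--
--         # Option 2: Do not merge anything
--         not_merged_sum = A[i] + dp[i + 1]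
--
--         # Choose the maximum sum for the current index
--         dp[i] = max(merged_sum, not_merged_sum)
--
--     # The maximum possible sum will be stored in dp[0]
--     return dp[0]
-- ===== SOURCE B (Python) =====
-- def merge_elements(a, b):
--     return int(str(a) + str(b))
--
-- def solution(A):
--     # Reformulation: total = sum(A) plus the best gain obtainable by merging a set of
--     # disjoint adjacent pairs; gains of overlapping pairs conflict, so this is a
--     # maximum-weight non-adjacent subset (house robber) over the gains array.
--     gains = [merge_elements(a, b) - a - b for a, b in zip(A, A[1:])]
--     take, skip = 0, 0
--     for g in gains:
--         take, skip = skip + g, max(take, skip)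
--     return sum(A) + max(take, skip)
-- ===== Notes on version B (the rewrite author's own statement) =====
-- stated objective: alternative
-- what changed: B replaces A's backward DP over the elements by a reduction: it computes the array of pairwise merge gains (merge(a,b)-a-b) and solves a maximum-weight non-adjacent-subset (house-robber) problem over that gains array, returning sum(A) plus the best gain.
-- intended difference: On a single-element list whose element is negative, A returns zero (its dp floor silently drops the last lone element), while B returns the element itself, which is the intended maximum obtainable sum of the non-empty list. — e.g. on solution([-5]): A returns 0, B returns -5
import Mathlib
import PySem

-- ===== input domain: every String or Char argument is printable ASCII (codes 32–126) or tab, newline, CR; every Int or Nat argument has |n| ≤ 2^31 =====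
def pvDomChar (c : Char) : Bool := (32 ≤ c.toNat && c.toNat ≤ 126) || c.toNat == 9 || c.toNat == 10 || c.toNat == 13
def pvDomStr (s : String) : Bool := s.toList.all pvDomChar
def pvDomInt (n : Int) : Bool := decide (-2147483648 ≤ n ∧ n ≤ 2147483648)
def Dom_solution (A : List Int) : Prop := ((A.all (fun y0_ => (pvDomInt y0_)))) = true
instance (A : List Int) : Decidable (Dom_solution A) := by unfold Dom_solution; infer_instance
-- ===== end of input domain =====

-- B: reduction to sum(A) + maximum-weight non-adjacent subset (house robber) of the pairwise
-- merge gains, instead of A's backward dp array over the elements; on a single negative element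
-- A returns zero (its dp floor) while B returns the element itself — stated as D_.


-- ===== PORT A =====
-- int(str(a) + str(b)); the ValueError case (b < 0 puts '-' mid-string) is excluded by Pre_solution
def mergeElements (a b : Int) : Int :=
  (PySem.Int.ofStr? (PySem.Int.toStr a ++ PySem.Int.toStr b)).getD 0

-- the body of A's right-to-left loop (dp[i] = max(merged_sum, not_merged_sum))
def stepA (A : List Int) (dp : List Int) (i : Int) : List Int :=
  let n : Int := PySem.List.len A
  let mergedSum : Int :=
    if i + 1 < n then
      mergeElements (PySem.List.pyGetD A i 0) (PySem.List.pyGetD A (i + 1) 0)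
        + PySem.List.pyGetD dp (i + 2) 0
    else 0
  let notMergedSum : Int := PySem.List.pyGetD A i 0 + PySem.List.pyGetD dp (i + 1) 0
  PySem.List.pySetD dp i (max mergedSum notMergedSum)

def solution (A : List Int) : Int :=
  let n : Int := PySem.List.len A
  let dp : List Int := PySem.List.pyRepeat [0] (n + 1)
  let dp := (PySem.List.pyRange (n - 1) (-1) (-1)).foldl (stepA A) dp
  PySem.List.pyGetD dp 0 0

-- ===== PORT B =====
def mergeElements_alt (a b : Int) : Int :=
  (PySem.Int.ofStr? (PySem.Int.toStr a ++ PySem.Int.toStr b)).getD 0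

-- the body of B's house-robber loop over the gains array
def stepR (st : Int × Int) (g : Int) : Int × Int :=
  (st.2 + g, max st.1 st.2)

def solution_alt (A : List Int) : Int :=
  let gains : List Int :=
    (A.zip (PySem.List.slice A (some 1) none)).map
      (fun p => mergeElements_alt p.1 p.2 - p.1 - p.2)
  let r := gains.foldl stepR (0, 0)
  A.sum + max r.1 r.2

-- ===== PRECONDITION & SPEC =====
-- A calls merge_elements(A[i], A[i+1]) for every adjacent pair, and int(str(a)+str(b))
-- raises ValueError whenever b < 0 ('-' lands mid-string): Pre_ requires every element
-- at index ≥ 1 to be nonnegative, exactly the inputs on which the Python A returns.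
def Pre_solution (A : List Int) : Prop := ∀ x ∈ A.tail, 0 ≤ x
instance (A : List Int) : Decidable (Pre_solution A) := by unfold Pre_solution; infer_instance
def pvWitness_solution : List Int := [-3, 4, 5]

-- On a single-element list with a negative element, A returns zero (its dp floor
-- max(merged_sum = 0, head + 0) drops the lone element) while B returns the element itself,
-- the intended maximum sum of a non-empty list.
def D_solution (A : List Int) : Prop := A.length = 1 ∧ A.headD 0 < 0
instance (A : List Int) : Decidable (D_solution A) := by unfold D_solution; infer_instance

def Spec_solution (A : List Int) (out : Int) : Prop := ¬ D_solution A → out = solution_alt A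
instance (A : List Int) (out : Int) : Decidable (Spec_solution A out) := by unfold Spec_solution; infer_instance

def pvDiffWitness_solution : List Int := [-5]
def pvDiffWitnessOut_solution : Int × Int := (0, -5)

-- ===== CLAIM (what is proved, stated in full; the proofs are below) =====
def Claim_unchanged_solution : Prop := ∀ (A : List Int), Dom_solution A → Pre_solution A → Spec_solution A (solution A)
def Claim_changed_solution : Prop := Dom_solution (pvDiffWitness_solution) ∧ Pre_solution (pvDiffWitness_solution) ∧ D_solution (pvDiffWitness_solution) ∧ solution (pvDiffWitness_solution) = pvDiffWitnessOut_solution.1 ∧ solution_alt (pvDiffWitness_solution) = pvDiffWitnessOut_solution.2 ∧ pvDiffWitnessOut_solution.1 ≠ pvDiffWitnessOut_solution.2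
def Claim_exact_solution : Prop := ∀ (A : List Int), Dom_solution A → Pre_solution A → D_solution A → solution A ≠ solution_alt A

-- ===== LEMMAS AND PROOFS =====

-- A's backward recurrence as a structural function (base case max 0 a = A's dp floor at i = n-1)
def F : List Int → Int
  | [] => 0
  | [a] => max 0 a
  | a :: b :: rest => max (mergeElements a b + F rest) (a + F (b :: rest))

-- B's intended value: max over tilings into singletons and merged adjacent pairs
def G : List Int → Int
  | [] => 0
  | [a] => a
  | a :: b :: rest => max (mergeElements a b + G rest) (a + G (b :: rest))

lemma stepA_val (A d : List Int) (i : Nat) (hi : i < A.length)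
    (h1 : PySem.List.pyGetD d ((i : Int) + 1) 0 = F (A.drop (i + 1)))
    (h2 : i + 1 < A.length → PySem.List.pyGetD d ((i : Int) + 2) 0 = F (A.drop (i + 2)))
    : (max (if (i : Int) + 1 < PySem.List.len A then
          mergeElements (PySem.List.pyGetD A (i : Int) 0) (PySem.List.pyGetD A ((i : Int) + 1) 0)
            + PySem.List.pyGetD d ((i : Int) + 2) 0
        else 0)
        (PySem.List.pyGetD A (i : Int) 0 + PySem.List.pyGetD d ((i : Int) + 1) 0))
      = F (A.drop i) := by
  have hAi : PySem.List.pyGetD A (i : Int) 0 = A[i] := by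
    rw [PySem.List.pyGetD_natCast]; exact List.getD_eq_getElem A 0 hi
  have hdrop : A.drop i = A[i] :: A.drop (i + 1) := List.drop_eq_getElem_cons hi
  by_cases hlt : i + 1 < A.length
  · have hAi1 : PySem.List.pyGetD A ((i : Int) + 1) 0 = A[i+1] := by
      rw [show ((i : Int) + 1) = ((i + 1 : Nat) : Int) by push_cast; ring, PySem.List.pyGetD_natCast]
      exact List.getD_eq_getElem A 0 hlt
    have hdrop1 : A.drop (i + 1) = A[i+1] :: A.drop (i + 2) := List.drop_eq_getElem_cons hlt
    rw [if_pos (by simp; omega), hAi, hAi1, h1, h2 hlt, hdrop, hdrop1, F]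
  · have hlen : i + 1 = A.length := by omega
    have hdrop1 : A.drop (i + 1) = [] := List.drop_eq_nil_of_le (by omega)
    rw [if_neg (by simp; omega), hAi, h1, hdrop1, hdrop, hdrop1]
    show max 0 (A[i] + F []) = F [A[i]]
    simp [F]

lemma dpA_inv (A : List Int) : ∀ (i : Nat) (d : List Int), i ≤ A.length →
    (∀ j : Nat, i ≤ j → j ≤ A.length → PySem.List.pyGetD d (j : Int) 0 = F (A.drop j)) →
    d.length = A.length + 1 →
    ∀ j : Nat, j ≤ A.length →
      PySem.List.pyGetD ((PySem.List.pyRange ((i : Int) - 1) (-1) (-1)).foldl (stepA A) d) (j : Int) 0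
        = F (A.drop j) := by
  intro i
  induction i with
  | zero =>
    intro d _ hinv _ j hj
    rw [PySem.List.pyRange_neg_one_eq_nil (by norm_num)]
    exact hinv j (Nat.zero_le j) hj
  | succ i ih =>
    intro d hle hinv hlen j hj
    have hcons : PySem.List.pyRange (((i : Nat) + 1 : Int) - 1) (-1) (-1)
        = (i : Int) :: PySem.List.pyRange ((i : Int) - 1) (-1) (-1) := by
      have := PySem.List.pyRange_neg_one_cons (a := (i : Int)) (b := (-1)) (by omega)
      simpa using this
    rw [show (((i + 1 : Nat) : Int) - 1) = (((i : Nat) + 1 : Int) - 1) by push_cast; ring, hcons,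
        List.foldl_cons]
    have hi : i < A.length := by omega
    refine ih (stepA A d (i : Int)) (by omega) ?_ ?_ j hj
    · intro j hij hjn
      unfold stepA
      rw [PySem.List.pyGetD_pySetD_natCast d i _ _ _ (by omega)]
      by_cases hji : j = i
      · rw [if_pos hji, hji]
        have e1 : PySem.List.pyGetD d ((i : Int) + 1) 0 = F (A.drop (i + 1)) := by
          have := hinv (i + 1) (by omega) (by omega); push_cast at this; exact this
        have e2 : i + 1 < A.length → PySem.List.pyGetD d ((i : Int) + 2) 0 = F (A.drop (i + 2)) := by
          intro h
          have := hinv (i + 2) (by omega) (by omega); push_cast at this; exact this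
        exact stepA_val A d i hi e1 e2
      · rw [if_neg hji]
        exact hinv j (by omega) hjn
    · unfold stepA; simp [hlen]

lemma solution_eq_F (A : List Int) : solution A = F A := by
  unfold solution
  simp only [PySem.List.len_eq]
  have h0 : ∀ j : Nat, A.length ≤ j → j ≤ A.length →
      PySem.List.pyGetD (PySem.List.pyRepeat ([0] : List Int) ((A.length : Int) + 1)) (j : Int) 0 = F (A.drop j) := by
    intro j h1 h2
    have hj : j = A.length := by omega
    subst hj
    rw [PySem.List.pyRepeat_singleton, List.drop_length]
    simp [PySem.List.pyGetD_natCast, List.getD, F]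
  have hlen : (PySem.List.pyRepeat ([0] : List Int) ((A.length : Int) + 1)).length = A.length + 1 := by
    rw [PySem.List.pyRepeat_singleton]; simp
  have := dpA_inv A A.length (PySem.List.pyRepeat ([0] : List Int) ((A.length : Int) + 1)) le_rfl h0 hlen 0 (Nat.zero_le _)
  simpa using this

-- best non-adjacent subset sum of a gains list (first element may be taken)
def Rb : List Int → Int
  | [] => 0
  | [x] => max 0 x
  | x :: y :: l => max (Rb (y :: l)) (x + Rb l)

-- the same with the first element forbidden
def Rt : List Int → Int
  | [] => 0
  | _ :: l => Rb l

lemma Rb_cons (x : Int) (l : List Int) : Rb (x :: l) = max (Rb l) (x + Rt l) := by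
  cases l with
  | nil => simp [Rb, Rt]
  | cons y l => simp [Rb, Rt]

lemma fold_robber : ∀ (g : List Int) (t s : Int),
    max ((g.foldl stepR (t, s)).1) ((g.foldl stepR (t, s)).2) = max (t + Rt g) (s + Rb g) := by
  intro g
  induction g with
  | nil => intro t s; simp [Rt, Rb]
  | cons x l ih =>
    intro t s
    rw [List.foldl_cons]
    show max ((l.foldl stepR (s + x, max t s)).1) ((l.foldl stepR (s + x, max t s)).2) = _
    rw [ih, Rb_cons]
    simp only [Rt]
    omega

-- the gains array, structurally
def gainsL : List Int → List Int
  | [] => []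
  | [_] => []
  | a :: b :: l => (mergeElements_alt a b - a - b) :: gainsL (b :: l)

lemma gains_eq : ∀ l : List Int,
    (l.zip l.tail).map (fun p => mergeElements_alt p.1 p.2 - p.1 - p.2) = gainsL l := by
  intro l
  match l with
  | [] => rfl
  | [_] => rfl
  | a :: b :: r =>
    simp only [List.tail_cons, List.zip_cons_cons, List.map_cons, gainsL]
    exact congrArg _ (gains_eq (b :: r))

lemma Rt_gains (b : Int) (rest : List Int) : Rt (gainsL (b :: rest)) = Rb (gainsL rest) := by
  cases rest with
  | nil => rfl
  | cons c l => rfl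

lemma Rt_le_Rb (g : List Int) : Rt g ≤ Rb g := by
  cases g with
  | nil => exact le_refl 0
  | cons x l => rw [Rb_cons]; exact le_max_left _ _

lemma G_eq_sum_Rb : ∀ (n : Nat) (l : List Int), l.length ≤ n →
    G l = l.sum + Rb (gainsL l) := by
  intro n
  induction n with
  | zero =>
    intro l hl
    have : l = [] := List.eq_nil_of_length_eq_zero (Nat.le_zero.mp hl)
    subst this; rfl
  | succ n ih =>
    intro l hl
    match l with
    | [] => rfl
    | [a] => simp [G, gainsL, Rb]
    | a :: b :: rest =>
      have h1 : G (b :: rest) = (b :: rest).sum + Rb (gainsL (b :: rest)) :=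
        ih (b :: rest) (by simp at hl ⊢; omega)
      have h2 : G rest = rest.sum + Rb (gainsL rest) :=
        ih rest (by simp at hl ⊢; omega)
      rw [show G (a :: b :: rest) = max (mergeElements a b + G rest) (a + G (b :: rest)) from rfl,
          h1, h2]
      rw [show gainsL (a :: b :: rest)
            = (mergeElements_alt a b - a - b) :: gainsL (b :: rest) from rfl, Rb_cons,
          Rt_gains]
      have hm : mergeElements_alt a b = mergeElements a b := rfl
      simp only [List.sum_cons, hm]
      omega

lemma solution_alt_eq_G (A : List Int) : solution_alt A = G A := by
  unfold solution_alt
  rw [PySem.List.slice_from_one, gains_eq]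
  show A.sum + max ((gainsL A).foldl stepR (0, 0)).1 ((gainsL A).foldl stepR (0, 0)).2 = G A
  have hmax : max ((gainsL A).foldl stepR (0, 0)).1 ((gainsL A).foldl stepR (0, 0)).2
      = Rb (gainsL A) := by
    rw [fold_robber]
    have := Rt_le_Rb (gainsL A)
    omega
  rw [hmax, G_eq_sum_Rb A.length A le_rfl]

lemma F_eq_G : ∀ (n : Nat) (l : List Int), l.length ≤ n → (∀ x ∈ l, 0 ≤ x) →
    ∀ a : Int, (l ≠ [] ∨ 0 ≤ a) → F (a :: l) = G (a :: l) := by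
  intro n
  induction n with
  | zero =>
    intro l hl _ a ha
    have : l = [] := List.eq_nil_of_length_eq_zero (Nat.le_zero.mp hl)
    subst this
    have : 0 ≤ a := ha.resolve_left (by simp)
    simp [F, G]; omega
  | succ n ih =>
    intro l hl hpos a ha
    match l with
    | [] =>
      have : 0 ≤ a := ha.resolve_left (by simp)
      simp [F, G]; omega
    | b :: l2 =>
      have hb : 0 ≤ b := hpos b (by simp)
      have h1 : F (b :: l2) = G (b :: l2) :=
        ih l2 (by simpa using hl) (fun x hx => hpos x (List.mem_cons_of_mem _ hx)) b (Or.inr hb)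
      have h2 : F l2 = G l2 := by
        match l2 with
        | [] => rfl
        | c :: l3 =>
          exact ih l3 (by simp at hl; omega)
            (fun x hx => hpos x (List.mem_cons_of_mem _ (List.mem_cons_of_mem _ hx)))
            c (Or.inr (hpos c (by simp)))
      simp only [F, G, h1, h2]

-- ===== VERDICT (by name: the statement is the Claim_ definition above) =====
theorem solution_spec : Claim_unchanged_solution := by
  intro A _ hPre
  unfold Spec_solution
  intro hnD
  rw [solution_eq_F, solution_alt_eq_G]
  match A with
  | [] => rfl
  | a :: l =>
    refine F_eq_G l.length l le_rfl (fun x hx => hPre x hx) a ?_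
    match l with
    | [] =>
      right
      by_contra hneg
      exact hnD ⟨rfl, by simpa using not_le.mp hneg⟩
    | b :: l2 => exact Or.inl (by simp)

theorem solution_changed : Claim_changed_solution := by
  unfold Claim_changed_solution; decide

theorem solution_tight : Claim_exact_solution := by
  intro A _ _ hD
  obtain ⟨hlen, hneg⟩ := hD
  obtain ⟨a, rfl⟩ := List.length_eq_one_iff.mp hlen
  simp only [List.headD] at hneg
  rw [solution_eq_F, solution_alt_eq_G]
  show F [a] ≠ G [a]
  simp only [F, G]
  omega
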